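-- pv_equiv track=rewrite | github.com/typosquatter/ail-typo-squatting | bin/typo.py | utilMissingDot
-- ===== SOURCE A (Python) =====
-- def utilMissingDot(resultLoc, loc):
--     """Function for missingDot algorithm"""
--
--     i = 0
--     while "." in loc:
--         loc2 = loc[::-1].replace(".", "", 1)[::-1]
--
--         loc = loc.replace(".", "", 1)
--
--         if loc not in resultLoc:
--             resultLoc.append(loc)
--
--         if loc2 not in resultLoc:
--             resultLoc.append(loc2)
--         i += 1
--
--     return resultLoc
-- ===== SOURCE B (Python) =====
-- def utilMissingDot(resultLoc, loc):
--     """missingDot variants via dot positions: A_k drops the first k dots,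
--     B_k drops the first k-1 dots plus the last dot (appended in place, deduped)."""
--     dots = [i for i, c in enumerate(loc) if c == "."]
--     if not dots:
--         return resultLoc
--     last = dots[-1]
--     banned = []
--     for d in dots:
--         b_banned = banned + [last]
--         banned = banned + [d]
--         a = "".join(c for i, c in enumerate(loc) if i not in banned)
--         b = "".join(c for i, c in enumerate(loc) if i not in b_banned)
--         if a not in resultLoc:
--             resultLoc.append(a)
--         if b not in resultLoc:
--             resultLoc.append(b)
--     return resultLoc
-- ===== Notes on version B (the rewrite author's own statement) =====
-- stated objective: alternative
-- what changed: B scans the string once to collect all dot positions and reconstructs each variant by index-filtering the original string (skip first k dots / first k-1 plus the last dot), instead of A's loop that repeatedly rewrites a shrinking copy with replace on the string and its reverse.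
import Mathlib
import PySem

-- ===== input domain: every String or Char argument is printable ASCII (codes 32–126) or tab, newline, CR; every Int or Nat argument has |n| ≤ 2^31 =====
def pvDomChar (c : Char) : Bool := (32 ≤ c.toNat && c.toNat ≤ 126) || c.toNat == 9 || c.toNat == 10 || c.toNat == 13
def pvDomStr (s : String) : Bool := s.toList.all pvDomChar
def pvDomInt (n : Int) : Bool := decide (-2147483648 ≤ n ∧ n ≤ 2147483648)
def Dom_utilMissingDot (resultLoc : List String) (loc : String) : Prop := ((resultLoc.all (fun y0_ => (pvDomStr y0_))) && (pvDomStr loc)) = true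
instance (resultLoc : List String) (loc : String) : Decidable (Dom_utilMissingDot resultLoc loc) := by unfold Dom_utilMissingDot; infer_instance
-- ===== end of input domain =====

-- B rebuilds each variant from the precomputed dot positions of the original string instead of
-- repeatedly rewriting a shrinking copy (objective: alternative decomposition, same cost).
-- In Python both programs append to resultLoc in place; the equivalence proved here is about the return value.

-- ===== PORT A =====

-- hand port of `s.replace(".", "", 1)` on code points (PySem.Str.replace has no count
-- parameter): removes the FIRST '.' if any, exactly as Python's count-limited replace.
def removeFirstDotChars : List Char → List Char
  | [] => []
  | c :: t => if c = '.' then t else c :: removeFirstDotChars t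

theorem count_removeFirstDotChars (l : List Char) (h : '.' ∈ l) :
    (removeFirstDotChars l).count '.' + 1 = l.count '.' := by
  induction l with
  | nil => cases h
  | cons c t ih =>
    by_cases hc : c = '.'
    · subst hc; simp [removeFirstDotChars]
    · rw [List.mem_cons] at h
      rcases h with h | h
      · exact absurd h.symm hc
      · simp [removeFirstDotChars, hc, ih h]

-- the while loop of A on code points; `"." in loc` is PySem.Chars.isIn,
-- `loc[::-1]` is List.reverse (PySem.List.slice?_none_none_neg_one)
def utilMissingDotGo (resultLoc : List String) (l : List Char) : List String :=
  if _h : PySem.Chars.isIn ['.'] l = true then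
    let loc2 := (removeFirstDotChars l.reverse).reverse
    let l' := removeFirstDotChars l
    let res1 := if resultLoc.contains (String.ofList l') then resultLoc else resultLoc ++ [String.ofList l']
    let res2 := if res1.contains (String.ofList loc2) then res1 else res1 ++ [String.ofList loc2]
    utilMissingDotGo res2 l'
  else resultLoc
termination_by l.count '.'
decreasing_by
  have hm : '.' ∈ l :=
    (List.singleton_infix_iff _ _).mp ((PySem.Chars.isIn_iff_infix (sub := ['.']) (s := l)).mp _h)
  have := count_removeFirstDotChars l hm
  omega

def utilMissingDot (resultLoc : List String) (loc : String) : List String :=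
  utilMissingDotGo resultLoc loc.toList

-- ===== PORT B =====

-- port of `[i for i, c in enumerate(loc) if c == "."]` carrying the running index
def dotIdxsFrom : List Char → Nat → List Nat
  | [], _ => []
  | c :: t, i => if c = '.' then i :: dotIdxsFrom t (i + 1) else dotIdxsFrom t (i + 1)

-- port of `"".join(c for i, c in enumerate(loc) if i not in banned)`
def skipIdx : List Char → List Nat → Nat → List Char
  | [], _, _ => []
  | c :: t, banned, i => if banned.contains i then skipIdx t banned (i + 1) else c :: skipIdx t banned (i + 1)

def utilMissingDotStep (l : List Char) (last : Nat) (st : List Nat × List String) (d : Nat) :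
    List Nat × List String :=
  let bb := st.1 ++ [last]
  let banned := st.1 ++ [d]
  let a := String.ofList (skipIdx l banned 0)
  let b := String.ofList (skipIdx l bb 0)
  let r1 := if st.2.contains a then st.2 else st.2 ++ [a]
  let r2 := if r1.contains b then r1 else r1 ++ [b]
  (banned, r2)

def utilMissingDot_alt (resultLoc : List String) (loc : String) : List String :=
  let l := loc.toList
  let dots := dotIdxsFrom l 0
  match PySem.List.pyGet? dots (-1) with   -- `dots[-1]`; none exactly on the early `if not dots: return`
  | none => resultLoc
  | some last => (dots.foldl (utilMissingDotStep l last) ([], resultLoc)).2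

-- ===== PRECONDITION & SPEC =====
def Spec_utilMissingDot (resultLoc : List String) (loc : String) (out : List String) : Prop := out = utilMissingDot_alt resultLoc loc
instance (resultLoc : List String) (loc : String) (out : List String) : Decidable (Spec_utilMissingDot resultLoc loc out) := by unfold Spec_utilMissingDot; infer_instance

-- ===== CLAIM (what is proved, stated in full; the proofs are below) =====
def Claim_equal_utilMissingDot : Prop := ∀ (resultLoc : List String) (loc : String), Dom_utilMissingDot resultLoc loc → Spec_utilMissingDot resultLoc loc (utilMissingDot resultLoc loc)

-- ===== LEMMAS AND PROOFS =====

-- remove-last-dot, the value A binds to loc2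
def rld (m : List Char) : List Char := (removeFirstDotChars m.reverse).reverse

-- append the two candidate strings with A's/B's shared dedup discipline
def app2 (res : List String) (a b : String) : List String :=
  let r1 := if res.contains a then res else res ++ [a]
  if r1.contains b then r1 else r1 ++ [b]

-- the k-th body of either loop, phrased over the original character list
def G (l : List Char) (k : Nat) (res : List String) : List String :=
  app2 res (String.ofList (removeFirstDotChars^[k + 1] l))
    (String.ofList (rld (removeFirstDotChars^[k] l)))

theorem rfd_cons_ne (c : Char) (t : List Char) (hc : c ≠ '.') :
    removeFirstDotChars (c :: t) = c :: removeFirstDotChars t := by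
  simp [removeFirstDotChars, hc]

theorem rfd_of_not_mem (l : List Char) (h : '.' ∉ l) : removeFirstDotChars l = l := by
  induction l with
  | nil => rfl
  | cons c t ih =>
    have hc : c ≠ '.' := fun hc => h (hc ▸ List.mem_cons_self)
    rw [rfd_cons_ne c t hc, ih (fun ht => h (List.mem_cons_of_mem _ ht))]

theorem iterate_rfd_cons (c : Char) (t : List Char) (k : Nat) (hc : c ≠ '.') :
    removeFirstDotChars^[k] (c :: t) = c :: removeFirstDotChars^[k] t := by
  induction k with
  | zero => rfl
  | succ k ih => rw [Function.iterate_succ_apply', ih, rfd_cons_ne c _ hc,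
      Function.iterate_succ_apply']

theorem count_iterate_rfd (l : List Char) (k : Nat) :
    (removeFirstDotChars^[k] l).count '.' = l.count '.' - k := by
  induction k with
  | zero => rfl
  | succ k ih =>
    rw [Function.iterate_succ_apply']
    by_cases h : '.' ∈ removeFirstDotChars^[k] l
    · have := count_removeFirstDotChars _ h
      omega
    · have h0 : (removeFirstDotChars^[k] l).count '.' = 0 := List.count_eq_zero.mpr h
      rw [rfd_of_not_mem _ h]
      omega

theorem mem_iterate_rfd (l : List Char) (k : Nat) (h : k < l.count '.') :
    '.' ∈ removeFirstDotChars^[k] l := by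
  have := count_iterate_rfd l k
  exact List.count_pos_iff.mp (by omega)

theorem rfd_append_mem (xs ys : List Char) (h : '.' ∈ xs) :
    removeFirstDotChars (xs ++ ys) = removeFirstDotChars xs ++ ys := by
  induction xs with
  | nil => cases h
  | cons c t ih =>
    by_cases hc : c = '.'
    · subst hc; simp [removeFirstDotChars]
    · rw [List.mem_cons] at h
      rcases h with h | h
      · exact absurd h.symm hc
      · rw [List.cons_append, rfd_cons_ne c _ hc, rfd_cons_ne c _ hc, ih h, List.cons_append]

theorem rfd_append_not_mem (xs ys : List Char) (h : '.' ∉ xs) :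
    removeFirstDotChars (xs ++ '.' :: ys) = xs ++ ys := by
  induction xs with
  | nil => simp [removeFirstDotChars]
  | cons c t ih =>
    have hc : c ≠ '.' := fun hc => h (hc ▸ List.mem_cons_self)
    rw [List.cons_append, rfd_cons_ne c _ hc, ih (fun ht => h (List.mem_cons_of_mem _ ht)),
      List.cons_append]

theorem rld_cons (c : Char) (m : List Char) (h : '.' ∈ m) : rld (c :: m) = c :: rld m := by
  unfold rld
  rw [List.reverse_cons, rfd_append_mem _ _ (List.mem_reverse.mpr h), List.reverse_append]
  rfl

theorem mem_dotIdxsFrom_ge (l : List Char) (i d : Nat) (h : d ∈ dotIdxsFrom l i) : i ≤ d := by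
  induction l generalizing i with
  | nil => cases h
  | cons c t ih =>
    by_cases hc : c = '.'
    · rw [dotIdxsFrom, if_pos hc, List.mem_cons] at h
      rcases h with h | h
      · omega
      · exact Nat.le_of_succ_le (ih (i + 1) h)
    · rw [dotIdxsFrom, if_neg hc] at h
      exact Nat.le_of_succ_le (ih (i + 1) h)

theorem length_dotIdxsFrom (l : List Char) (i : Nat) :
    (dotIdxsFrom l i).length = l.count '.' := by
  induction l generalizing i with
  | nil => rfl
  | cons c t ih =>
    by_cases hc : c = '.'
    · subst hc; simp [dotIdxsFrom, ih]
    · simp [dotIdxsFrom, hc, ih]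

theorem contains_of_all_gt (B : List Nat) (i : Nat) (h : ∀ b ∈ B, i < b) :
    B.contains i = false := by
  simp only [List.contains_eq_mem, decide_eq_false_iff_not]
  exact fun hm => absurd (h i hm) (lt_irrefl i)

theorem getLast_eq_of_eq {α : Type} {l₁ l₂ : List α} (h : l₁ = l₂) (h₁ : l₁ ≠ []) :
    l₁.getLast h₁ = l₂.getLast (h ▸ h₁) := by subst h; rfl

theorem skipIdx_of_lt (l : List Char) (B : List Nat) (i : Nat) (h : ∀ b ∈ B, b < i) :
    skipIdx l B i = l := by
  induction l generalizing i with
  | nil => rfl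
  | cons c t ih =>
    have hc : B.contains i = false := by
      simp only [List.contains_eq_mem, decide_eq_false_iff_not]
      exact fun hm => absurd (h i hm) (lt_irrefl i)
    rw [skipIdx, hc]
    simp only [Bool.false_eq_true, if_false]
    rw [ih (i + 1) (fun b hb => Nat.lt_succ_of_lt (h b hb))]

theorem skipIdx_cons_lt (l : List Char) (B : List Nat) (b i : Nat) (h : b < i) :
    skipIdx l (b :: B) i = skipIdx l B i := by
  induction l generalizing i with
  | nil => rfl
  | cons c t ih =>
    have hb : (b :: B).contains i = B.contains i := by
      simp only [List.contains_eq_mem, List.mem_cons, decide_eq_decide]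
      constructor
      · rintro (h' | h')
        · omega
        · exact h'
      · exact Or.inr
    rw [skipIdx, skipIdx, hb, ih (i + 1) (Nat.lt_succ_of_lt h)]

-- B's a-string: skipping the first k dot positions is k first-dot removals
theorem skipIdx_take (l : List Char) (i k : Nat) :
    skipIdx l ((dotIdxsFrom l i).take k) i = removeFirstDotChars^[k] l := by
  induction l generalizing i k with
  | nil => rw [skipIdx, Function.iterate_fixed rfl]
  | cons c t ih =>
    by_cases hc : c = '.'
    · subst hc
      match k with
      | 0 =>
        rw [List.take_zero, skipIdx_of_lt _ _ _ (by intro b hb; cases hb)]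
        rfl
      | k' + 1 =>
        rw [dotIdxsFrom, if_pos rfl, List.take_succ_cons, skipIdx, List.contains_cons]
        simp only [BEq.rfl, Bool.true_or]
        rw [skipIdx_cons_lt _ _ _ _ (Nat.lt_succ_self i), ih (i + 1) k',
          Function.iterate_succ_apply]
        rfl
    · rw [dotIdxsFrom, if_neg hc, skipIdx,
        contains_of_all_gt _ _ (fun b hb => mem_dotIdxsFrom_ge t (i + 1) b (List.mem_of_mem_take hb))]
      simp only [Bool.false_eq_true, if_false]
      rw [ih (i + 1) k, iterate_rfd_cons c t k hc]

-- B's b-string: skipping the first k dots plus the LAST dot is k removals then a last-dot removal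
theorem skipIdx_take_last (l : List Char) (i k : Nat) (hk : k < (dotIdxsFrom l i).length)
    (hne : dotIdxsFrom l i ≠ []) :
    skipIdx l ((dotIdxsFrom l i).take k ++ [(dotIdxsFrom l i).getLast hne]) i
      = rld (removeFirstDotChars^[k] l) := by
  induction l generalizing i k with
  | nil => exact absurd rfl hne
  | cons c t ih =>
    by_cases hc : c = '.'
    · subst hc
      have hD : dotIdxsFrom ('.' :: t) i = i :: dotIdxsFrom t (i + 1) := by
        rw [dotIdxsFrom, if_pos rfl]
      match k with
      | 0 =>
        by_cases hD' : dotIdxsFrom t (i + 1) = []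
        · -- the only dot is the head
          have hlast : (dotIdxsFrom ('.' :: t) i).getLast hne = i := by
            simp [hD, hD']
          rw [List.take_zero, List.nil_append, hlast, skipIdx, List.contains_cons]
          simp only [BEq.rfl, Bool.true_or]
          rw [skipIdx_cons_lt _ _ _ _ (Nat.lt_succ_self i),
            skipIdx_of_lt _ _ _ (by intro b hb; cases hb)]
          have hnt : '.' ∉ t := by
            have h0 := length_dotIdxsFrom t (i + 1)
            rw [hD', List.length_nil] at h0
            exact List.count_eq_zero.mp (by omega)
          rw [Function.iterate_zero_apply]
          unfold rld
          rw [List.reverse_cons,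
            rfd_append_not_mem _ [] (fun hm => hnt (List.mem_reverse.mp hm))]
          simp
        · have hlast : (dotIdxsFrom ('.' :: t) i).getLast hne
              = (dotIdxsFrom t (i + 1)).getLast hD' :=
            (getLast_eq_of_eq hD hne).trans (List.getLast_cons hD')
          have hpos : 0 < (dotIdxsFrom t (i + 1)).length := List.length_pos_iff.mpr hD'
          have hmem : '.' ∈ t := by
            have h0 := length_dotIdxsFrom t (i + 1)
            exact List.count_pos_iff.mp (by omega)
          have hgt : i < (dotIdxsFrom t (i + 1)).getLast hD' :=
            mem_dotIdxsFrom_ge t (i + 1) _ (List.getLast_mem hD')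
          rw [List.take_zero, List.nil_append, hlast, skipIdx]
          rw [contains_of_all_gt _ _ (by
            intro b hb
            rcases List.mem_singleton.mp hb with rfl
            exact hgt)]
          simp only [Bool.false_eq_true, if_false]
          have hih := ih (i + 1) 0 hpos hD'
          rw [List.take_zero, List.nil_append] at hih
          rw [hih, Function.iterate_zero_apply, Function.iterate_zero_apply]
          exact (rld_cons '.' t hmem).symm
      | k' + 1 =>
        have hk' : k' < (dotIdxsFrom t (i + 1)).length := by
          rw [hD] at hk
          simpa using hk
        have hD' : dotIdxsFrom t (i + 1) ≠ [] := by
          intro h0; rw [h0] at hk'; cases hk'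
        have hlast : (dotIdxsFrom ('.' :: t) i).getLast hne
            = (dotIdxsFrom t (i + 1)).getLast hD' :=
          (getLast_eq_of_eq hD hne).trans (List.getLast_cons hD')
        rw [hlast, hD, List.take_succ_cons, List.cons_append, skipIdx, List.contains_cons]
        simp only [BEq.rfl, Bool.true_or]
        rw [skipIdx_cons_lt _ _ _ _ (Nat.lt_succ_self i), ih (i + 1) k' hk' hD',
          Function.iterate_succ_apply]
        rfl
    · have hD : dotIdxsFrom (c :: t) i = dotIdxsFrom t (i + 1) := by
        rw [dotIdxsFrom, if_neg hc]
      have hD' : dotIdxsFrom t (i + 1) ≠ [] := by rw [← hD]; exact hne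
      have hk2 : k < (dotIdxsFrom t (i + 1)).length := by rw [← hD]; exact hk
      have hlast : (dotIdxsFrom (c :: t) i).getLast hne
          = (dotIdxsFrom t (i + 1)).getLast hD' :=
        getLast_eq_of_eq hD hne
      rw [hlast, hD, skipIdx]
      rw [contains_of_all_gt _ _ (by
        intro b hb
        rcases List.mem_append.mp hb with hb | hb
        · exact mem_dotIdxsFrom_ge t (i + 1) b (List.mem_of_mem_take hb)
        · rcases List.mem_singleton.mp hb with rfl
          exact mem_dotIdxsFrom_ge t (i + 1) _ (List.getLast_mem hD'))]
      simp only [Bool.false_eq_true, if_false]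
      rw [ih (i + 1) k hk2 hD', iterate_rfd_cons c t k hc]
      have hmem : '.' ∈ removeFirstDotChars^[k] t := by
        apply mem_iterate_rfd
        rw [← length_dotIdxsFrom t (i + 1)]
        exact hk2
      exact (rld_cons c _ hmem).symm

-- A's loop computes the canonical fold
theorem goA_eq_fold (n : Nat) : ∀ (l : List Char) (res : List String), l.count '.' = n →
    utilMissingDotGo res l = (List.range n).foldl (fun r k => G l k r) res := by
  induction n with
  | zero =>
    intro l res hn
    rw [utilMissingDotGo]
    have hf : ¬ PySem.Chars.isIn ['.'] l = true := by
      rw [PySem.Chars.isIn_iff_infix]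
      intro hinf
      have hm := (List.singleton_infix_iff _ _).mp hinf
      have := List.count_pos_iff.mpr hm
      omega
    simp [hf]
  | succ m ih =>
    intro l res hn
    have hmem : '.' ∈ l := List.count_pos_iff.mp (by omega)
    have hin : PySem.Chars.isIn ['.'] l = true := by
      rw [PySem.Chars.isIn_iff_infix]
      exact (List.singleton_infix_iff _ _).mpr hmem
    rw [utilMissingDotGo, dif_pos hin]
    have hcount : (removeFirstDotChars l).count '.' = m := by
      have := count_removeFirstDotChars l hmem
      omega
    rw [ih (removeFirstDotChars l) _ hcount,
      List.range_succ_eq_map, List.foldl_cons, List.foldl_map]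
    rfl

-- B's fold over the remaining dots, with the processed prefix as loop state
theorem foldB_eq (l : List Char) (hne : dotIdxsFrom l 0 ≠ [])
    (suf : List Nat) : ∀ (pre : List Nat) (res : List String),
    dotIdxsFrom l 0 = pre ++ suf →
    (suf.foldl (utilMissingDotStep l ((dotIdxsFrom l 0).getLast hne)) (pre, res)).2
      = (List.range' pre.length suf.length).foldl (fun r k => G l k r) res := by
  induction suf with
  | nil => intro pre res _; rfl
  | cons d suf' ih =>
    intro pre res hsplit
    have htake : (dotIdxsFrom l 0).take pre.length = pre := by
      rw [hsplit, List.take_left]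
    have htake1 : (dotIdxsFrom l 0).take (pre.length + 1) = pre ++ [d] := by
      rw [hsplit, List.take_append]
      simp
    have hlen : pre.length < (dotIdxsFrom l 0).length := by
      rw [hsplit]; simp
    have ha : skipIdx l (pre ++ [d]) 0 = removeFirstDotChars^[pre.length + 1] l := by
      rw [← htake1, skipIdx_take]
    have hb : skipIdx l (pre ++ [(dotIdxsFrom l 0).getLast hne]) 0
        = rld (removeFirstDotChars^[pre.length] l) := by
      conv_lhs => rw [← htake]
      rw [skipIdx_take_last l 0 pre.length hlen hne]
    rw [List.foldl_cons]
    have hstep : utilMissingDotStep l ((dotIdxsFrom l 0).getLast hne) (pre, res) d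
        = (pre ++ [d], G l pre.length res) := by
      simp only [utilMissingDotStep, G, app2, ha, hb]
    rw [hstep, ih (pre ++ [d]) _ (by rw [hsplit, List.append_assoc]; rfl)]
    simp [List.range'_succ]

theorem alt_eq_fold (res : List String) (loc : String) :
    utilMissingDot_alt res loc
      = (List.range (loc.toList.count '.')).foldl (fun r k => G loc.toList k r) res := by
  unfold utilMissingDot_alt
  dsimp only
  by_cases hne : dotIdxsFrom loc.toList 0 = []
  · have hc : loc.toList.count '.' = 0 := by
      rw [← length_dotIdxsFrom loc.toList 0, hne]
      rfl
    rw [hne, hc]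
    rfl
  · have hget : PySem.List.pyGet? (dotIdxsFrom loc.toList 0) (-1)
        = some ((dotIdxsFrom loc.toList 0).getLast hne) := by
      rw [PySem.List.pyGet?_neg_one, List.getLast?_eq_some_getLast]
    rw [hget]
    dsimp only
    have := foldB_eq loc.toList hne (dotIdxsFrom loc.toList 0) [] res rfl
    simp only [List.length_nil] at this
    rw [this, length_dotIdxsFrom, List.range_eq_range']

-- ===== VERDICT (by name: the statement is the Claim_ definition above) =====
theorem utilMissingDot_spec : Claim_equal_utilMissingDot := by
  intro res loc _
  unfold Spec_utilMissingDot utilMissingDot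
  rw [goA_eq_fold (loc.toList.count '.') loc.toList res rfl, alt_eq_fold]
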